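-- pv_equiv track=rewrite | github.com/Hupo0626/LeetCode | python/solutions/String.py | lengthOfLongestSubstringTwoDistinct0159
-- ===== SOURCE A (Python) =====
-- def lengthOfLongestSubstringTwoDistinct0159(s):
--     res, left, n = 0, 0, 0
--     cache = {}
--     for ri, v in enumerate(s):
--         if v in cache and cache[v] >= left:
--             cache[v] = ri
--         elif n < 2:
--             n += 1
--         else:
--             nse = s[ri - 1]
--             for va in range(ri - 1, left - 1, -1):
--                 if s[va] != nse:
--                     se = va
--                     break
--             left = se + 1
--         cache[v] = ri
--         if ri - left + 1 > res:
--             res = ri - left + 1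
--     return res
-- ===== SOURCE B (Python) =====
-- def lengthOfLongestSubstringTwoDistinct0159(s):
--     # O(n) one pass, O(1) space: track the two window chars and the start of the
--     # current run of the last char; no dict, no backward rescans.
--     res = 0
--     left = 0
--     run_start = 0
--     c1 = None  # the other distinct char in the window (None while < 2 distinct seen)
--     c2 = None  # char of the current run ending at i-1
--     for i, c in enumerate(s):
--         if c2 is None:
--             c2 = c
--         elif c != c2:
--             if c1 is not None and c != c1:
--                 left = run_start
--             c1, c2 = c2, c
--             run_start = i
--         if i - left + 1 > res:
--             res = i - left + 1
--     return res
-- ===== Notes on version B (the rewrite author's own statement) =====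
-- stated objective: faster
-- what changed: Replaced A's last-seen-index dict plus backward rescan of the window on every third distinct char by a single O(1)-space pass that tracks the two window characters and the start index of the current run, so the left edge is updated in constant time with no dict and no inner scan.
import Mathlib
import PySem

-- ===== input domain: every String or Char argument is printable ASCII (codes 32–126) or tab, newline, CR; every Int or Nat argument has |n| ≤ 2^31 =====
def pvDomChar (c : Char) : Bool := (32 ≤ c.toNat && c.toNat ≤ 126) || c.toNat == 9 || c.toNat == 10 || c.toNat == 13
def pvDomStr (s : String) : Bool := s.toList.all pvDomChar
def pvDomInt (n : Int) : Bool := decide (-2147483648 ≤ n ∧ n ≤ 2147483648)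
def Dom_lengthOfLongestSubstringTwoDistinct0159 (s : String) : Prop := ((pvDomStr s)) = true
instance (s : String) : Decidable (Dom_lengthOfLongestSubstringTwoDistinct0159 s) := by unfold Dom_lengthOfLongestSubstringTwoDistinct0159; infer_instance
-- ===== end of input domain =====

-- B replaces A's last-index dict and backward rescan by an O(1)-space single pass
-- tracking the two window characters and the start of the current run (objective: faster).

-- ===== PORT A =====
-- `v in cache and cache[v] >= left`
def pvHitA (cache : PySem.Dict Char Int) (left : Int) (v : Char) : Bool :=
  match cache.get? v with
  | some j => decide (left ≤ j)
  | none => false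

def pvStepA (cs : List Char) (st : Int × Int × Int × PySem.Dict Char Int) (p : Int × Char) :
    Int × Int × Int × PySem.Dict Char Int :=
  let res := st.1
  let left := st.2.1
  let n := st.2.2.1
  let cache := st.2.2.2
  let ri := p.1
  let v := p.2
  let t : Int × Int × PySem.Dict Char Int :=
    if pvHitA cache left v then
      (left, n, cache.insert v ri)
    else if n < 2 then
      (left, n + 1, cache)
    else
      -- nse = s[ri-1]; backward scan for the first va with s[va] != nse (the break);
      -- the scan always breaks in reachable states, the getD default is never used
      let nse := PySem.List.pyGetD cs (ri - 1) ' '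
      let se := ((PySem.List.pyRange (ri - 1) (left - 1) (-1)).find?
                   (fun va => PySem.List.pyGetD cs va ' ' != nse)).getD (left - 1)
      (se + 1, n, cache)
  let left' := t.1
  let n' := t.2.1
  let cache' := (t.2.2).insert v ri
  let res' := if ri - left' + 1 > res then ri - left' + 1 else res
  (res', left', n', cache')

def lengthOfLongestSubstringTwoDistinct0159 (s : String) : Int :=
  ((PySem.List.enumerate s.toList 0).foldl (pvStepA s.toList)
      (0, 0, 0, PySem.Dict.empty)).1

-- ===== PORT B =====
def pvStepB (st : Int × Int × Int × Option Char × Option Char) (p : Int × Char) :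
    Int × Int × Int × Option Char × Option Char :=
  let res := st.1
  let left := st.2.1
  let runStart := st.2.2.1
  let c1 := st.2.2.2.1
  let c2 := st.2.2.2.2
  let i := p.1
  let c := p.2
  let t : Int × Int × Option Char × Option Char :=
    match c2 with
    | none => (left, runStart, c1, some c)
    | some d =>
      if c ≠ d then
        ((match c1 with
          | some e => if c ≠ e then runStart else left
          | none => left), i, some d, some c)
      else
        (left, runStart, c1, c2)
  let left' := t.1
  let res' := if i - left' + 1 > res then i - left' + 1 else res
  (res', left', t.2.1, t.2.2.1, t.2.2.2)

def lengthOfLongestSubstringTwoDistinct0159_alt (s : String) : Int :=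
  ((PySem.List.enumerate s.toList 0).foldl pvStepB (0, 0, 0, none, none)).1

-- ===== PRECONDITION & SPEC =====
def Spec_lengthOfLongestSubstringTwoDistinct0159 (s : String) (out : Int) : Prop := out = lengthOfLongestSubstringTwoDistinct0159_alt s
instance (s : String) (out : Int) : Decidable (Spec_lengthOfLongestSubstringTwoDistinct0159 s out) := by unfold Spec_lengthOfLongestSubstringTwoDistinct0159; infer_instance

-- ===== CLAIM (what is proved, stated in full; the proofs are below) =====
def Claim_equal_lengthOfLongestSubstringTwoDistinct0159 : Prop := ∀ (s : String), Dom_lengthOfLongestSubstringTwoDistinct0159 s → Spec_lengthOfLongestSubstringTwoDistinct0159 s (lengthOfLongestSubstringTwoDistinct0159 s)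

-- ===== LEMMAS AND PROOFS =====

-- character of cs at (nonnegative, in-range) index j, as both ports read it
def pvG (cs : List Char) (j : Int) : Char := PySem.List.pyGetD cs j ' '

-- The joint loop invariant after processing the prefix of length i.
structure pvInv (cs : List Char) (i : Int)
    (stA : Int × Int × Int × PySem.Dict Char Int)
    (stB : Int × Int × Int × Option Char × Option Char) : Prop where
  res_eq : stB.1 = stA.1
  left_eq : stB.2.1 = stA.2.1
  L_lo : 0 ≤ stA.2.1
  zero : i = 0 → stA.1 = 0 ∧ stA.2.1 = 0 ∧ stA.2.2.1 = 0 ∧ stB.2.2.1 = 0 ∧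
      stB.2.2.2.1 = none ∧ stB.2.2.2.2 = none
  pos : 1 ≤ i →
      stB.2.2.2.2 = some (pvG cs (i-1)) ∧
      stA.2.1 ≤ stB.2.2.1 ∧ stB.2.2.1 ≤ i-1 ∧
      (∀ j, stB.2.2.1 ≤ j → j ≤ i-1 → pvG cs j = pvG cs (i-1)) ∧
      (stB.2.2.1 = stA.2.1 ∨ pvG cs (stB.2.2.1 - 1) ≠ pvG cs (i-1)) ∧
      (∀ j, stA.2.1 ≤ j → j ≤ i-1 → pvG cs j = pvG cs (i-1) ∨ some (pvG cs j) = stB.2.2.2.1) ∧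
      ((stB.2.2.2.1 = none ∧ stA.2.2.1 = 1 ∧ stA.2.1 = 0 ∧
          ∀ j, 0 ≤ j → j ≤ i-1 → pvG cs j = pvG cs 0) ∨
       (∃ e, stB.2.2.2.1 = some e ∧ stA.2.2.1 = 2 ∧ e ≠ pvG cs (i-1) ∧
          ∃ j, stA.2.1 ≤ j ∧ j ≤ i-1 ∧ pvG cs j = e))
  cache_some : ∀ c j, (stA.2.2.2).get? c = some j ↔
      (0 ≤ j ∧ j ≤ i-1 ∧ pvG cs j = c ∧ ∀ k, j < k → k ≤ i-1 → pvG cs k ≠ c)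
  cache_none : ∀ c, (stA.2.2.2).get? c = none → ∀ k, 0 ≤ k → k ≤ i-1 → pvG cs k ≠ c

-- the first index (scanning a, a-1, …, b+1) satisfying p, when everything above m fails and m hits
theorem pvFind_countdown (p : Int → Bool) (a b m : Int) (hmb : b < m) (hma : m ≤ a)
    (hpm : p m = true) (habove : ∀ j, m < j → j ≤ a → p j = false) :
    (PySem.List.pyRange a b (-1)).find? p = some m := by
  generalize hk : (a - m).toNat = k
  induction k generalizing a with
  | zero =>
    have : a = m := by omega
    subst this
    rw [PySem.List.pyRange_neg_one_cons (by omega)]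
    simp [hpm]
  | succ k ih =>
    rw [PySem.List.pyRange_neg_one_cons (by omega)]
    have hpa : p a = false := habove a (by omega) le_rfl
    rw [List.find?_cons, hpa]
    exact ih (a - 1) (by omega) (by intro j h1 h2; exact habove j h1 (by omega)) (by omega)

-- last-occurrence dict spec is preserved by `cache[v] = ri`
theorem pvCache_upd (cs : List Char) (i : Int) (hi : 0 ≤ i) (v : Char) (hgv : pvG cs i = v)
    (cache : PySem.Dict Char Int)
    (hsome : ∀ c j, cache.get? c = some j ↔
      (0 ≤ j ∧ j ≤ i-1 ∧ pvG cs j = c ∧ ∀ k, j < k → k ≤ i-1 → pvG cs k ≠ c))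
    (hnone : ∀ c, cache.get? c = none → ∀ k, 0 ≤ k → k ≤ i-1 → pvG cs k ≠ c) :
    (∀ c j, (cache.insert v i).get? c = some j ↔
      (0 ≤ j ∧ j ≤ i ∧ pvG cs j = c ∧ ∀ k, j < k → k ≤ i → pvG cs k ≠ c))
    ∧ (∀ c, (cache.insert v i).get? c = none → ∀ k, 0 ≤ k → k ≤ i → pvG cs k ≠ c) := by
  constructor
  · intro c j
    by_cases hcv : c = v
    · subst hcv
      rw [PySem.Dict.get?_insert_self]
      constructor
      · rintro h1
        injection h1 with h1
        subst h1
        exact ⟨hi, le_refl _, hgv, fun k hk1 hk2 => by omega⟩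
      · rintro ⟨h1, h2, h3, h4⟩
        by_cases hji : j = i
        · rw [hji]
        · exact absurd hgv (h4 i (by omega) (le_refl _))
    · rw [PySem.Dict.get?_insert, if_neg hcv]
      rw [hsome]
      constructor
      · rintro ⟨h1, h2, h3, h4⟩
        refine ⟨h1, by omega, h3, fun k hk1 hk2 => ?_⟩
        by_cases hki : k = i
        · subst hki; rw [hgv]; exact fun hq => hcv hq.symm
        · exact h4 k hk1 (by omega)
      · rintro ⟨h1, h2, h3, h4⟩
        have hji : j ≠ i := fun hq => hcv (by rw [← h3, hq, hgv])
        exact ⟨h1, by omega, h3, fun k hk1 hk2 => h4 k hk1 (by omega)⟩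
  · intro c hc k hk1 hk2
    by_cases hcv : c = v
    · subst hcv; rw [PySem.Dict.get?_insert_self] at hc; cases hc
    · rw [PySem.Dict.get?_insert, if_neg hcv] at hc
      by_cases hki : k = i
      · subst hki; rw [hgv]; exact fun hq => hcv hq.symm
      · exact hnone c hc k hk1 (by omega)

theorem pvStep_inv (cs : List Char) (i : Int) (hi : 0 ≤ i) (v : Char)
    (hv : PySem.List.pyGet? cs i = some v)
    (stA : Int × Int × Int × PySem.Dict Char Int)
    (stB : Int × Int × Int × Option Char × Option Char)
    (h : pvInv cs i stA stB) :
    pvInv cs (i+1) (pvStepA cs stA (i, v)) (pvStepB stB (i, v)) := by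
  obtain ⟨resA, L, n, cache⟩ := stA
  obtain ⟨resB, L', rs, c1, c2⟩ := stB
  obtain ⟨hres, hleft, hL0, hzero, hpos, hcsome, hcnone⟩ := h
  dsimp only at hres hleft hL0 hzero hpos hcsome hcnone
  obtain rfl : resA = resB := hres.symm
  obtain rfl : L = L' := hleft.symm
  have hgv : pvG cs i = v := by simp [pvG, PySem.List.pyGetD, hv]
  have hii : i + 1 - 1 = i := by ring
  have hcache := pvCache_upd cs i hi v hgv cache hcsome hcnone
  by_cases hi0 : i = 0
  · -- first iteration
    subst hi0
    obtain ⟨rfl, rfl, rfl, rfl, rfl, rfl⟩ := hzero rfl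
    have hhit : pvHitA cache 0 v = false := by
      cases hg : cache.get? v with
      | none => simp [pvHitA, hg]
      | some j =>
        have := (hcsome v j).1 hg
        exact absurd this (by omega)
    have hA : pvStepA cs (0, 0, 0, cache) (0, v) = (1, 0, 1, cache.insert v 0) := by
      norm_num [pvStepA, hhit]
    have hB : pvStepB (0, 0, 0, none, none) (0, v) = (1, 0, 0, none, some v) := by
      norm_num [pvStepB]
    rw [hA, hB]
    refine ⟨rfl, rfl, le_refl _, fun habs => absurd habs (by omega), fun _ => ?_, ?_, ?_⟩
    · simp only [hii]
      refine ⟨by rw [hgv], le_refl _, le_refl _,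
        fun j h1 h2 => by rw [show j = (0:Int) by omega], Or.inl (by trivial),
        fun j h1 h2 => Or.inl (by rw [show j = (0:Int) by omega]),
        Or.inl ⟨by trivial, by trivial, by trivial, fun j h1 h2 => by rw [show j = (0:Int) by omega]⟩⟩
    · simp only [hii]; exact hcache.1
    · simp only [hii]; exact hcache.2
  · -- i ≥ 1
    obtain ⟨hc2, hLrs, hrsi, hrun, hmax, hwin, hc1⟩ := hpos (by omega)
    subst hc2
    by_cases hvw : v = pvG cs (i-1)
    · -- current char equals the previous char: A takes the cache branch, B does nothing
      have hkey : pvG cs i = pvG cs (i-1) := by rw [hgv, hvw]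
      have hhit : pvHitA cache L v = true := by
        cases hg : cache.get? v with
        | none => exact absurd hvw.symm (hcnone v hg (i-1) (by omega) (by omega))
        | some j =>
          obtain ⟨hj0, hji, hjc, hlast⟩ := (hcsome v j).1 hg
          have hj : j = i - 1 := by
            by_contra hne
            exact hlast (i-1) (by omega) (le_refl _) hvw.symm
          simp only [pvHitA, hg, decide_eq_true_iff]
          omega
      have hA : pvStepA cs (resA, L, n, cache) (i, v)
          = ((if i - L + 1 > resA then i - L + 1 else resA), L, n, cache.insert v i) := by
        simp [pvStepA, hhit, PySem.Dict.insert_insert_self]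
      have hB : pvStepB (resA, L, rs, c1, some (pvG cs (i-1))) (i, v)
          = ((if i - L + 1 > resA then i - L + 1 else resA), L, rs, c1, some (pvG cs (i-1))) := by
        simp [pvStepB, hvw]
      rw [hA, hB]
      refine ⟨rfl, rfl, hL0, fun habs => absurd habs (by omega), fun _ => ?_, ?_, ?_⟩
      · simp only [hii]
        refine ⟨by rw [hkey], hLrs, by omega, ?_, ?_, ?_, ?_⟩
        · intro j h1 h2
          by_cases hji : j = i
          · rw [hji]
          · exact (hrun j h1 (by omega)).trans hkey.symm
        · rcases hmax with h | h
          · exact Or.inl h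
          · exact Or.inr (by rw [hkey]; exact h)
        · intro j h1 h2
          by_cases hji : j = i
          · exact Or.inl (by rw [hji])
          · rcases hwin j h1 (by omega) with h | h
            · exact Or.inl (by rw [hkey]; exact h)
            · exact Or.inr h
        · rcases hc1 with ⟨h1, h2, h3, h4⟩ | ⟨e, he, hn2, hne, j0, hj1, hj2, hj3⟩
          · refine Or.inl ⟨h1, h2, h3, fun j hj1 hj2 => ?_⟩
            by_cases hji : j = i
            · rw [hji, hkey]
              exact h4 (i-1) (by omega) (by omega)
            · exact h4 j hj1 (by omega)
          · exact Or.inr ⟨e, he, hn2, by rw [hkey]; exact hne, j0, hj1, by omega, hj3⟩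
      · simp only [hii]; exact hcache.1
      · simp only [hii]; exact hcache.2
    · -- current char differs from the previous char
      have hNe : pvG cs (i-1) ≠ pvG cs i := by
        rw [hgv]; exact fun hq => hvw hq.symm
      rcases hc1 with ⟨hc1n, hn1, hLz, hall⟩ | ⟨e, he, hn2, hne, j0, hj01, hj02, hj03⟩
      · -- fewer than two distinct chars so far: A bumps n, B records the second char
        subst hc1n hn1 hLz
        have hw0 : pvG cs (i-1) = pvG cs 0 := hall (i-1) (by omega) (by omega)
        have hhit : pvHitA cache 0 v = false := by
          cases hg : cache.get? v with
          | none => simp [pvHitA, hg]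
          | some j =>
            obtain ⟨hj0, hji, hjc, hlast⟩ := (hcsome v j).1 hg
            exact absurd (by rw [← hjc, hall j hj0 hji, ← hw0] : v = pvG cs (i-1)) hvw
        have hA : pvStepA cs (resA, 0, 1, cache) (i, v)
            = ((if i - 0 + 1 > resA then i - 0 + 1 else resA), 0, 2, cache.insert v i) := by
          norm_num [pvStepA, hhit]
        have hB : pvStepB (resA, 0, rs, none, some (pvG cs (i-1))) (i, v)
            = ((if i - 0 + 1 > resA then i - 0 + 1 else resA), 0, i, some (pvG cs (i-1)), some v) := by
          simp only [pvStepB]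
          rw [if_pos (show v ≠ pvG cs (i-1) from hvw)]
        rw [hA, hB]
        refine ⟨rfl, rfl, le_refl _, fun habs => absurd habs (by omega), fun _ => ?_, ?_, ?_⟩
        · simp only [hii]
          refine ⟨by rw [hgv], by omega, le_refl _, fun j h1 h2 => by rw [show j = i by omega], Or.inr hNe, ?_, ?_⟩
          · intro j h1 h2
            by_cases hji : j = i
            · exact Or.inl (by rw [hji])
            · exact Or.inr (by rw [hall j h1 (by omega), ← hw0])
          · exact Or.inr ⟨pvG cs (i-1), by trivial, by trivial, hNe, i-1, by omega, by omega, by trivial⟩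
        · simp only [hii]; exact hcache.1
        · simp only [hii]; exact hcache.2
      · -- two distinct chars already in the window
        subst he hn2
        by_cases hve : v = e
        · -- v is the other window char: A takes the cache branch, B swaps roles
          have hhit : pvHitA cache L v = true := by
            cases hg : cache.get? v with
            | none =>
              have hveq : pvG cs j0 = v := by rw [hve]; exact hj03
              exact absurd hveq (hcnone v hg j0 (by omega) hj02)
            | some j =>
              obtain ⟨hj0, hji, hjc, hlast⟩ := (hcsome v j).1 hg
              have : L ≤ j := by
                by_contra hlt
                exact hlast j0 (by omega) hj02 (by rw [hj03, ← hve])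
              simpa [pvHitA, hg] using this
          have hA : pvStepA cs (resA, L, 2, cache) (i, v)
              = ((if i - L + 1 > resA then i - L + 1 else resA), L, 2, cache.insert v i) := by
            simp [pvStepA, hhit, PySem.Dict.insert_insert_self]
          have hB : pvStepB (resA, L, rs, some e, some (pvG cs (i-1))) (i, v)
              = ((if i - L + 1 > resA then i - L + 1 else resA), L, i, some (pvG cs (i-1)), some v) := by
            simp only [pvStepB]
            rw [if_pos (show v ≠ pvG cs (i-1) from hvw), if_neg (show ¬(v ≠ e) from fun hq => hq hve)]
          rw [hA, hB]
          refine ⟨rfl, rfl, hL0, fun habs => absurd habs (by omega), fun _ => ?_, ?_, ?_⟩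
          · simp only [hii]
            refine ⟨by rw [hgv], by omega, le_refl _, fun j h1 h2 => by rw [show j = i by omega],
              Or.inr hNe, ?_, ?_⟩
            · intro j h1 h2
              by_cases hji : j = i
              · exact Or.inl (by rw [hji])
              · rcases hwin j h1 (by omega) with h | h
                · exact Or.inr (by rw [h])
                · have h' : pvG cs j = e := by injection h
                  exact Or.inl (by rw [h', ← hve, hgv])
            · exact Or.inr ⟨pvG cs (i-1), by trivial, by trivial, hNe, i-1, by omega, by omega, by trivial⟩
          · simp only [hii]; exact hcache.1
          · simp only [hii]; exact hcache.2
        · -- a third distinct char: A rescans backwards, B jumps to the run start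
          have hhit : pvHitA cache L v = false := by
            cases hg : cache.get? v with
            | none => simp [pvHitA, hg]
            | some j =>
              simp only [pvHitA, hg, decide_eq_false_iff_not]
              intro hLj
              obtain ⟨hj0, hji, hjc, hlast⟩ := (hcsome v j).1 hg
              rcases hwin j hLj hji with h | h
              · exact hvw (by rw [← hjc, h])
              · exact hve (by injection h with h; rw [← hjc, h])
          have hrsneq : ¬ rs = L := by
            intro heq
            exact hne (by rw [← hj03, hrun j0 (by omega) hj02])
          have hner : pvG cs (rs-1) ≠ pvG cs (i-1) := hmax.resolve_left hrsneq
          have hfind : (PySem.List.pyRange (i-1) (L-1) (-1)).find?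
              (fun va => PySem.List.pyGetD cs va ' ' != PySem.List.pyGetD cs (i-1) ' ')
              = some (rs-1) := by
            apply pvFind_countdown _ (i-1) (L-1) (rs-1) (by omega) (by omega)
            · simp only [bne_iff_ne, ne_eq]
              exact hner
            · intro j h1 h2
              have hj := hrun j (by omega) (by omega)
              simp only [pvG] at hj
              simp [hj]
          have hA : pvStepA cs (resA, L, 2, cache) (i, v)
              = ((if i - rs + 1 > resA then i - rs + 1 else resA), rs, 2, cache.insert v i) := by
            have h21 : ¬ ((2:Int) < 2) := by norm_num
            simp only [pvStepA, hhit, Bool.false_eq_true, if_false, h21, hfind]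
            have hrs1 : rs - 1 + 1 = rs := by ring
            simp [hrs1]
          have hB : pvStepB (resA, L, rs, some e, some (pvG cs (i-1))) (i, v)
              = ((if i - rs + 1 > resA then i - rs + 1 else resA), rs, i, some (pvG cs (i-1)), some v) := by
            simp only [pvStepB]
            rw [if_pos (show v ≠ pvG cs (i-1) from hvw), if_pos (show v ≠ e from hve)]
          rw [hA, hB]
          refine ⟨rfl, rfl, by dsimp only; omega, fun habs => absurd habs (by omega), fun _ => ?_, ?_, ?_⟩
          · simp only [hii]
            refine ⟨by rw [hgv], by omega, le_refl _, fun j h1 h2 => by rw [show j = i by omega],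
              Or.inr hNe, ?_, ?_⟩
            · intro j h1 h2
              by_cases hji : j = i
              · exact Or.inl (by rw [hji])
              · exact Or.inr (by rw [hrun j h1 (by omega)])
            · exact Or.inr ⟨pvG cs (i-1), by trivial, by trivial, hNe, i-1, by omega, by omega, by trivial⟩
          · simp only [hii]; exact hcache.1
          · simp only [hii]; exact hcache.2

theorem pvFold_inv : ∀ (suf pre : List Char)
    (stA : Int × Int × Int × PySem.Dict Char Int)
    (stB : Int × Int × Int × Option Char × Option Char),
    pvInv (pre ++ suf) (pre.length : Int) stA stB →
    ((PySem.List.enumerate suf (pre.length : Int)).foldl (pvStepA (pre ++ suf)) stA).1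
      = ((PySem.List.enumerate suf (pre.length : Int)).foldl pvStepB stB).1 := by
  intro suf
  induction suf with
  | nil => intro pre stA stB h; simpa [PySem.List.enumerate_nil] using h.res_eq.symm
  | cons v suf' ih =>
    intro pre stA stB h
    rw [PySem.List.enumerate_cons]
    simp only [List.foldl_cons]
    have hv : PySem.List.pyGet? (pre ++ v :: suf') (pre.length : Int) = some v :=
      PySem.List.pyGet?_append_length pre suf' v
    have hstep := pvStep_inv (pre ++ v :: suf') (pre.length : Int) (Int.natCast_nonneg _) v hv stA stB h
    have hrw : pre ++ v :: suf' = (pre ++ [v]) ++ suf' := by simp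
    have hlen : ((pre ++ [v]).length : Int) = (pre.length : Int) + 1 := by
      simp [List.length_append]
    have := ih (pre ++ [v]) (pvStepA (pre ++ v :: suf') stA ((pre.length : Int), v))
                (pvStepB stB ((pre.length : Int), v)) (by rw [hlen, ← hrw]; exact hstep)
    rw [← hrw] at this
    rw [hlen] at this
    exact this

theorem lengthOfLongestSubstringTwoDistinct0159_spec : Claim_equal_lengthOfLongestSubstringTwoDistinct0159 := by
  unfold Claim_equal_lengthOfLongestSubstringTwoDistinct0159
  intro s _
  unfold Spec_lengthOfLongestSubstringTwoDistinct0159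
  unfold lengthOfLongestSubstringTwoDistinct0159 lengthOfLongestSubstringTwoDistinct0159_alt
  have h0 : pvInv ([] ++ s.toList) (([] : List Char).length : Int)
      (0, 0, 0, PySem.Dict.empty) (0, 0, 0, none, none) := by
    constructor <;> intros <;>
      simp_all [PySem.Dict.get?_empty] <;> omega
  simpa using pvFold_inv s.toList [] (0, 0, 0, PySem.Dict.empty) (0, 0, 0, none, none) h0
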